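-- pv_equiv track=rewrite | github.com/jimin0826/python-study | Language Model/language_model/tokenizer.py | word_tokenizer
-- ===== SOURCE A (Python) =====
-- def word_tokenizer(word):
--     if ('.' not in word) and ('\'' not in word):
--         return word
--     else:
--         if '\'' in word:
--             # 따옴표로 시작해서 따옴표로 끝나는 단어의 따옴표 삭제, 단어 도중에 따옴표가 나오는 경우 따옴표 포함 뒤의 글자 모두 삭제
--             if word.index('\'') == 0:
--                 word = word[1:]
--
--             if '\'' in word:
--                 word = word[:word.index('\'')]
--
--             return word
--
--         if '.' in word:
--             # .com 으로 끝나는 단어는 토큰화되지 않도록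
--             if word[-4:] == ".com":
--                 return word
--
--             # 마침표로 연결된 단어에서 마침표 앞, 뒤 및 사이에 있는 글자가 모두 1개일 경우 마침표 삭제, 0개 혹은 2개 이상이면 토큰화되지 않도록
--             elif len(word) % 2 == 1:
--                 for i in range(len(word)):
--                     if word[i] == '.' and i%2==1:
--                         continue
--                     elif word[i] != '.' and i%2==0:
--                         continue
--                     else: break
--                 else: word = word.replace('.','')
--             else: return word
--
--         return word
-- ===== SOURCE B (Python) =====
-- def word_tokenizer(word):
--     if "'" in word:
--         # drop a leading quote, then keep everything before the next quote (if any)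
--         rest = word[1:] if word[0] == "'" else word
--         cut = rest.find("'")
--         return rest if cut == -1 else rest[:cut]
--     if '.' in word and word[-4:] != ".com":
--         # dots are removed exactly when every dot-separated segment is a single character
--         parts = word.split('.')
--         if all(len(p) == 1 for p in parts):
--             return word.replace('.', '')
--     return word
-- ===== Notes on version B (the rewrite author's own statement) =====
-- stated objective: simpler
-- what changed: The period branch's index-parity scan loop (for-else over range(len) checking dots at odd and non-dots at even positions, guarded by len%2==1) is replaced by word.split('.') with an all-segments-length-1 test, which subsumes the odd-length guard; the quote branch is restructured around a single find instead of repeated membership/index calls.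
import Mathlib
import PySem

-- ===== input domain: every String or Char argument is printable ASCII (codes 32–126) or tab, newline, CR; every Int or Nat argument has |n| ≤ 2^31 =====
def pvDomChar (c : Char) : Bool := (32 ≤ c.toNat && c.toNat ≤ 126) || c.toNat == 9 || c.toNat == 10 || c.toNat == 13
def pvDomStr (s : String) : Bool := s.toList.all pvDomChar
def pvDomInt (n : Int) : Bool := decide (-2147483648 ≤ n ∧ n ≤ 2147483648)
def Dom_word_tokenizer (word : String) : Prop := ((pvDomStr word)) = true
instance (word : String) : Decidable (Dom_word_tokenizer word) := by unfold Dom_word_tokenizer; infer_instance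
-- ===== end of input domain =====

-- B replaces A's index-parity for-else scan in the period branch by split('.') plus an
-- all-segments-length-1 test (which subsumes A's len%2 guard), and restructures the quote
-- branch around a single find; proved to return A's value on every input (A is total).
-- Both ports work on word.toList with PySem.Chars.* (the exact Str semantics on toList).

-- ===== PORT A =====
-- the for-else loop over range(len(word)): true iff the loop ran to completion (Python's
-- `else:` arm fires), false iff it hit `break`; w[i] is in range at each recursive call
def pvLoopA (w : List Char) (i : Nat) : Bool :=
  if h : i < w.length then
    if w[i] == '.' && i % 2 == 1 then pvLoopA w (i + 1)
    else if !(w[i] == '.') && i % 2 == 0 then pvLoopA w (i + 1)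
    else false
  else true
termination_by w.length - i

def word_tokenizer (word : String) : String :=
  let w := word.toList
  if !(PySem.Chars.isIn ['.'] w) && !(PySem.Chars.isIn ['\''] w) then word
  else
    if PySem.Chars.isIn ['\''] w then
      -- word.index("'") == 0 is find == 0 (index raises only when the quote is absent,
      -- which the enclosing `if` rules out)
      let w1 := if PySem.Chars.find w ['\''] == 0 then PySem.Chars.slice w (some 1) none else w
      let w2 := if PySem.Chars.isIn ['\''] w1 then
                  PySem.Chars.slice w1 none (some (PySem.Chars.find w1 ['\''])) else w1
      String.ofList w2
    else
      if PySem.Chars.isIn ['.'] w then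
        if PySem.Chars.slice w (some (-4)) none == ['.', 'c', 'o', 'm'] then word
        else if w.length % 2 == 1 then
          let w' := if pvLoopA w 0 then PySem.Chars.replace w ['.'] [] else w
          String.ofList w'
        else word
      else word

-- ===== PORT B =====
def word_tokenizer_alt (word : String) : String :=
  let w := word.toList
  if PySem.Chars.isIn ['\''] w then
    -- word[0] == "'": w is nonempty here (it contains a quote), so pyGet? w 0 is some
    let rest := if PySem.Chars.pyGet? w 0 == some '\'' then PySem.Chars.slice w (some 1) none else w
    let cut := PySem.Chars.find rest ['\'']
    if cut == -1 then String.ofList rest else String.ofList (PySem.Chars.slice rest none (some cut))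
  else
    if PySem.Chars.isIn ['.'] w && !(PySem.Chars.slice w (some (-4)) none == ['.', 'c', 'o', 'm']) then
      let parts := PySem.Chars.splitOn w ['.']
      if parts.all (fun p => p.length == 1) then String.ofList (PySem.Chars.replace w ['.'] []) else word
    else word

-- ===== PRECONDITION & SPEC =====
def Spec_word_tokenizer (word : String) (out : String) : Prop := out = word_tokenizer_alt word
instance (word : String) (out : String) : Decidable (Spec_word_tokenizer word out) := by unfold Spec_word_tokenizer; infer_instance

-- ===== CLAIM (what is proved, stated in full; the proofs are below) =====
def Claim_equal_word_tokenizer : Prop := ∀ (word : String), Dom_word_tokenizer word → Spec_word_tokenizer word (word_tokenizer word)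

-- ===== LEMMAS AND PROOFS =====

-- parity-alternation checker: the Bool argument is "the current index is even"
def chkA : Bool → List Char → Bool
  | _, [] => true
  | true, x :: t => !(x == '.') && chkA false t
  | false, x :: t => (x == '.') && chkA true t

-- structural form of word.split('.')
def splitCh : List Char → List (List Char)
  | [] => [[]]
  | x :: t => if x == '.' then [] :: splitCh t
              else (x :: (splitCh t).headD []) :: (splitCh t).tail

theorem splitCh_ne_nil (l : List Char) : splitCh l ≠ [] := by
  cases l with
  | nil => simp [splitCh]
  | cons x t => simp only [splitCh]; split <;> simp

theorem splitCh_cons_head_tail (l : List Char) :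
    (splitCh l).head?.getD [] :: (splitCh l).tail = splitCh l := by
  cases h : splitCh l with
  | nil => exact absurd h (splitCh_ne_nil l)
  | cons p ps => simp

theorem splitOn_go_eq (l : List Char) : ∀ (cur : List Char) (acc : List (List Char)) (fuel : Nat),
    l.length ≤ fuel →
    PySem.Chars.splitOn.go ['.'] fuel l cur acc
      = acc.reverse ++ ((cur.reverse ++ (splitCh l).headD []) :: (splitCh l).tail) := by
  induction l with
  | nil =>
    intro cur acc fuel _
    cases fuel <;> rw [PySem.Chars.splitOn.go] <;> simp [splitCh]
  | cons c t ih =>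
    intro cur acc fuel hf
    cases fuel with
    | zero => simp at hf
    | succ f =>
      have hf' : t.length ≤ f := by simpa using hf
      by_cases hc : c = '.'
      · subst hc
        rw [PySem.Chars.splitOn.go]
        simp only [List.isPrefixOf, Bool.true_and, BEq.rfl, if_true,
          List.length_singleton, List.drop_one, List.tail_cons]
        rw [ih [] (cur.reverse :: acc) f hf']
        simp [splitCh]
        exact splitCh_cons_head_tail t
      · rw [PySem.Chars.splitOn.go]
        have hpre : (['.'].isPrefixOf (c :: t)) = false := by
          simp [List.isPrefixOf]; intro h; exact absurd h.symm hc
        rw [hpre]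
        simp only [Bool.false_eq_true, if_false]
        rw [ih (c :: cur) acc f hf']
        have : (c == '.') = false := by simp [hc]
        simp [splitCh, this]

theorem splitOn_eq_splitCh (l : List Char) : PySem.Chars.splitOn l ['.'] = splitCh l := by
  rw [PySem.Chars.splitOn, splitOn_go_eq l [] [] (l.length + 1) (by omega)]
  simpa using splitCh_cons_head_tail l

theorem splitCh_all_eq : ∀ (l : List Char),
    (splitCh l).all (fun p => p.length == 1) = (chkA true l && decide (l.length % 2 = 1))
  | [] => by simp [splitCh, chkA]
  | [x] => by
      by_cases hx : x = '.' <;> simp [splitCh, chkA, hx]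
  | x :: d :: t => by
      by_cases hx : x = '.'
      · simp [splitCh, chkA, hx]
      · by_cases hd : d = '.'
        · have ihh := splitCh_all_eq t
          have hmod : ((t.length + 1 + 1) % 2 = 1) ↔ (t.length % 2 = 1) := by omega
          have hxe : (x == '.') = false := by simp [hx]
          simp [splitCh, chkA, hxe, hd, ihh, hmod]
        · simp [splitCh, chkA, hx, hd]

theorem pvLoopA_eq_chkA (w : List Char) : ∀ (i : Nat),
    pvLoopA w i = chkA (i % 2 == 0) (List.drop i w) := by
  intro i
  induction hn : w.length - i using Nat.strong_induction_on generalizing i with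
  | _ n ihn =>
  subst hn
  by_cases h : i < w.length
  · rw [pvLoopA, dif_pos h, List.drop_eq_getElem_cons h]
    have hrec : pvLoopA w (i + 1) = chkA ((i + 1) % 2 == 0) (List.drop (i + 1) w) :=
      ihn (w.length - (i + 1)) (by omega) (i + 1) rfl
    rcases Nat.mod_two_eq_zero_or_one i with hm | hm
    · have hm1 : (i + 1) % 2 = 1 := by omega
      by_cases hdot : w[i] = '.'
      · simp [hm, hdot, chkA, -List.getElem_cons_drop]
      · simp [hm, hm1, hdot, chkA, hrec, -List.getElem_cons_drop]
    · have hm1 : (i + 1) % 2 = 0 := by omega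
      by_cases hdot : w[i] = '.'
      · simp [hm, hm1, hdot, chkA, hrec, -List.getElem_cons_drop]
      · simp [hm, hdot, chkA, -List.getElem_cons_drop]
  · rw [pvLoopA, dif_neg h]
    have : List.drop i w = [] := List.drop_eq_nil_of_le (by omega)
    simp [this, chkA]

theorem find_zero_iff_head (w : List Char) (hq : PySem.Chars.isIn ['\''] w = true) :
    (PySem.Chars.find w ['\''] == 0) = (PySem.Chars.pyGet? w 0 == some '\'') := by
  have hnn : 0 ≤ PySem.Chars.find w ['\''] :=
    (PySem.Chars.find_nonneg_iff w ['\'']).mpr ((PySem.Chars.isIn_iff_infix ['\''] w).mp hq)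
  obtain ⟨hpre, hmin⟩ := PySem.Chars.find_spec hnn
  cases w with
  | nil => exact absurd hq (by decide)
  | cons c t =>
    have hget : PySem.Chars.pyGet? (c :: t) 0 = some c := by
      simp [PySem.List.pyGet?, PySem.List.pyIdx?]
    rw [hget]
    by_cases hc : c = '\''
    · subst hc
      have h0 : PySem.Chars.find ('\'' :: t) ['\''] = 0 := by
        by_contra hne
        have hpos : 0 < (PySem.Chars.find ('\'' :: t) ['\'']).toNat := by omega
        exact hmin 0 hpos (by simp)
      simp [h0]
    · have hne : PySem.Chars.find (c :: t) ['\''] ≠ 0 := by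
        intro h0
        rw [h0] at hpre
        simp [List.cons_prefix_cons] at hpre
        exact hc hpre.symm
      simp [hne, hc]

-- ===== VERDICT (by name: the statement is the Claim_ definition above) =====
theorem word_tokenizer_spec : Claim_equal_word_tokenizer := by
  intro word _
  unfold Spec_word_tokenizer word_tokenizer word_tokenizer_alt
  simp only []
  by_cases hq : PySem.Chars.isIn ['\''] word.toList = true
  · -- quote branch on both sides
    rw [find_zero_iff_head word.toList hq]
    simp only [hq, if_true]
    by_cases hz : (PySem.Chars.pyGet? word.toList 0 == some '\'') = true
    · simp only [hz, if_true]
      by_cases hf : PySem.Chars.find (PySem.List.slice word.toList (some 1) none) ['\''] = -1 <;>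
        simp [PySem.Chars.isIn, hf]
    · simp only [Bool.not_eq_true] at hz
      simp only [hz, Bool.false_eq_true, if_false]
      by_cases hf : PySem.Chars.find word.toList ['\''] = -1
      · simp [PySem.Chars.isIn, hf]
      · simp [PySem.Chars.isIn, hf]
  · simp only [Bool.not_eq_true] at hq
    by_cases hd : PySem.Chars.isIn ['.'] word.toList = true
    · simp only [hq, hd, Bool.not_false, if_true]
      rw [splitOn_eq_splitCh, splitCh_all_eq]
      have hl : pvLoopA word.toList 0 = chkA true word.toList := by
        simpa using pvLoopA_eq_chkA word.toList 0
      by_cases hcom : PySem.List.slice word.toList (some (-4)) none = ['.', 'c', 'o', 'm']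
      · simp [hcom]
      · by_cases hodd : word.length % 2 = 1
        · by_cases hck : chkA true word.toList = true
          · simp [hcom, hodd, hck, hl]
          · simp only [Bool.not_eq_true] at hck
            simp [hcom, hodd, hck, hl]
        · simp [hcom, hodd]
    · simp only [Bool.not_eq_true] at hd
      simp [hq, hd]
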